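-- pv_equiv track=rewrite | github.com/luuconghoangnam/graplite-scan | tools/graplite_scan.py | file_dependency_details
-- ===== SOURCE A (Python) =====
-- from collections import defaultdict
-- from typing import Any, Dict, Iterable, List, Optional, Sequence, Set, Tuple
--
-- def file_dependency_details(edges: Dict[str, Set[str]], ranked: List[Tuple[str, int, int, int]]) -> Dict[str, List[str]]:
--     top_files = [f for f, _, _, _ in ranked[:20]]
--     details: Dict[str, List[str]] = {}
--     reverse: Dict[str, List[str]] = defaultdict(list)
--     for src, dests in edges.items():
--         for d in dests:
--             reverse[d].append(src)
--     for f in top_files: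
--         deps = sorted(edges.get(f, set()))[:12]
--         revs = sorted(reverse.get(f, []))[:12]
--         lines: List[str] = []
--         if deps:
--             lines.append('depends on: ' + ', '.join(f'`{d}`' for d in deps))
--         if revs:
--             lines.append('used by: ' + ', '.join(f'`{r}`' for r in revs))
--         if lines:
--             details[f] = lines
--     return details
-- ===== SOURCE B (Python) =====
-- def file_dependency_details(edges, ranked):
--     def lines_for(f):
--         deps = sorted(edges.get(f, ()))[:12]
--         revs = sorted(src for src, dests in edges.items() if f in dests)[:12]
--         groups = [('depends on: ', deps), ('used by: ', revs)]
--         return [label + ', '.join('`%s`' % x for x in grp) for label, grp in groups if grp]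
--     details = {}
--     for f, _, _, _ in ranked[:20]:
--         lines = lines_for(f)
--         if lines:
--             details[f] = lines
--     return details
-- ===== Notes on version B (the rewrite author's own statement) =====
-- stated objective: simpler
-- what changed: B removes the defaultdict reverse-index precomputation entirely, scanning edges on demand per top file for used-by sources, and builds each file's lines by filtering a label/group pair list instead of conditional appends.
import Mathlib
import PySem

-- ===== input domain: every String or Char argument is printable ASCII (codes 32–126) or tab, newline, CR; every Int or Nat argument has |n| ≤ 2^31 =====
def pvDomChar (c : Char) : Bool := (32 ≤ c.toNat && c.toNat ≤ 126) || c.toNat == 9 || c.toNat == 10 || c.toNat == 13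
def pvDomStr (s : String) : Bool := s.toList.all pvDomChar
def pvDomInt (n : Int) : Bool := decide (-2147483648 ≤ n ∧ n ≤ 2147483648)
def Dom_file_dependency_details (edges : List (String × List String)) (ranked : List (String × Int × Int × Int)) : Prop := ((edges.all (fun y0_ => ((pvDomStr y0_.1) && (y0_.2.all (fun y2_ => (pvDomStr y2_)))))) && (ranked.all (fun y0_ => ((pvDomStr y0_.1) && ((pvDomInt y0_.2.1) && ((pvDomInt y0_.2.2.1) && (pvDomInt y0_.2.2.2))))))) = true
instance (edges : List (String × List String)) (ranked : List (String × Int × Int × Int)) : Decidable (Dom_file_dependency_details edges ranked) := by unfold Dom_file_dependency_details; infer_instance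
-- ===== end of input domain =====

-- B drops A's precomputed reverse-dependency index and instead scans `edges` once per top file,
-- building the two lines with a filtered label/group list (objective: simpler).

-- ===== PORT A =====
def file_dependency_details (edges : List (String × List String)) (ranked : List (String × Int × Int × Int)) : List (String × List String) :=
  let top_files := (PySem.List.slice ranked none (some 20)).map (fun t => t.1)
  let reverse : PySem.Dict String (List String) :=
    edges.foldl (fun rev sd =>
      sd.2.foldl (fun rev d => PySem.Dict.modify rev d [] (fun l => l ++ [sd.1])) rev)
      PySem.Dict.empty
  let details : PySem.Dict String (List String) :=
    top_files.foldl (fun details f =>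
      let deps := PySem.List.slice (PySem.List.sorted (PySem.Dict.getD (PySem.Dict.mk edges) f []) (fun x => x) false) none (some 12)
      let revs := PySem.List.slice (PySem.List.sorted (PySem.Dict.getD reverse f []) (fun x => x) false) none (some 12)
      let lines : List String := []
      let lines := if deps = [] then lines else lines ++ ["depends on: " ++ PySem.Str.join ", " (deps.map (fun d => "`" ++ d ++ "`"))]
      let lines := if revs = [] then lines else lines ++ ["used by: " ++ PySem.Str.join ", " (revs.map (fun r => "`" ++ r ++ "`"))]
      if lines = [] then details else PySem.Dict.insert details f lines)
      PySem.Dict.empty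
  details.items

-- ===== PORT B =====
def pvLinesFor (edges : List (String × List String)) (f : String) : List String :=
  let deps := PySem.List.slice (PySem.List.sorted (PySem.Dict.getD (PySem.Dict.mk edges) f []) (fun x => x) false) none (some 12)
  let revs := PySem.List.slice (PySem.List.sorted ((edges.filter (fun sd => sd.2.contains f)).map (fun sd => sd.1)) (fun x => x) false) none (some 12)
  (([("depends on: ", deps), ("used by: ", revs)].filter (fun g => !g.2.isEmpty)).map
    (fun g => g.1 ++ PySem.Str.join ", " (g.2.map (fun x => "`" ++ x ++ "`"))))

def file_dependency_details_alt (edges : List (String × List String)) (ranked : List (String × Int × Int × Int)) : List (String × List String) :=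
  ((PySem.List.slice ranked none (some 20)).foldl (fun details t =>
      let lines := pvLinesFor edges t.1
      if lines = [] then details else PySem.Dict.insert details t.1 lines)
    (PySem.Dict.empty : PySem.Dict String (List String))).items

-- ===== PRECONDITION & SPEC =====
-- Pre_ only requires each destination list to have distinct elements: in Python it is a set,
-- which cannot contain duplicates, so no input A accepts is excluded.
def Pre_file_dependency_details (edges : List (String × List String)) (ranked : List (String × Int × Int × Int)) : Prop :=
  ∀ sd ∈ edges, sd.2.Nodup
instance (edges : List (String × List String)) (ranked : List (String × Int × Int × Int)) : Decidable (Pre_file_dependency_details edges ranked) := by unfold Pre_file_dependency_details; infer_instance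
def pvWitness_file_dependency_details : (List (String × List String)) × (List (String × Int × Int × Int)) :=
  ([("a", ["b", "c"]), ("b", ["c"])], [("a", 3, 1, 2), ("c", 2, 0, 1)])

def Spec_file_dependency_details (edges : List (String × List String)) (ranked : List (String × Int × Int × Int)) (out : List (String × List String)) : Prop := out = file_dependency_details_alt edges ranked
instance (edges : List (String × List String)) (ranked : List (String × Int × Int × Int)) (out : List (String × List String)) : Decidable (Spec_file_dependency_details edges ranked out) := by unfold Spec_file_dependency_details; infer_instance

-- ===== CLAIM (what is proved, stated in full; the proofs are below) =====
def Claim_equal_file_dependency_details : Prop := ∀ (edges : List (String × List String)) (ranked : List (String × Int × Int × Int)), Dom_file_dependency_details edges ranked → Pre_file_dependency_details edges ranked → Spec_file_dependency_details edges ranked (file_dependency_details edges ranked)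

-- ===== LEMMAS AND PROOFS =====

-- one inner pass of A's reverse-index loop, on a duplicate-free destination set
lemma pv_inner_getD (dests : List String) (hn : dests.Nodup) (src f : String)
    (rev0 : PySem.Dict String (List String)) :
    PySem.Dict.getD (dests.foldl (fun rev d => PySem.Dict.modify rev d [] (fun l => l ++ [src])) rev0) f []
      = PySem.Dict.getD rev0 f [] ++ (if dests.contains f then [src] else []) := by
  induction dests generalizing rev0 with
  | nil => simp
  | cons d ds ih =>
    simp only [List.foldl_cons]
    rw [ih (by simpa using hn.of_cons)]
    rw [PySem.Dict.getD_modify]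
    by_cases hf : f = d
    · subst hf
      have hnot : f ∉ ds := (List.nodup_cons.mp hn).1
      have hcf : ds.contains f = false := by simpa using hnot
      simp [hnot]
    · simp [hf]

-- A's finished reverse index, read at f, is B's on-demand scan of edges
lemma pv_rev_getD (edges : List (String × List String)) (h : ∀ sd ∈ edges, sd.2.Nodup)
    (f : String) (rev0 : PySem.Dict String (List String)) :
    PySem.Dict.getD (edges.foldl (fun rev sd =>
        sd.2.foldl (fun rev d => PySem.Dict.modify rev d [] (fun l => l ++ [sd.1])) rev) rev0) f []
      = PySem.Dict.getD rev0 f [] ++ (edges.filter (fun sd => sd.2.contains f)).map (fun sd => sd.1) := by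
  induction edges generalizing rev0 with
  | nil => simp
  | cons sd rest ih =>
    simp only [List.foldl_cons]
    rw [ih (fun x hx => h x (List.mem_cons_of_mem _ hx))]
    rw [pv_inner_getD sd.2 (h sd (List.mem_cons_self)) sd.1 f rev0]
    by_cases hc : f ∈ sd.2
    · simp [hc]
    · simp [hc]

-- B's filtered label/group list produces exactly A's two conditional appends
lemma pv_lines_eq (deps revs : List String) :
    (([("depends on: ", deps), ("used by: ", revs)].filter (fun g => !g.2.isEmpty)).map
      (fun g : String × List String => g.1 ++ PySem.Str.join ", " (g.2.map (fun x => "`" ++ x ++ "`"))))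
    = (let lines : List String := []
       let lines := if deps = [] then lines else lines ++ ["depends on: " ++ PySem.Str.join ", " (deps.map (fun d => "`" ++ d ++ "`"))]
       if revs = [] then lines else lines ++ ["used by: " ++ PySem.Str.join ", " (revs.map (fun r => "`" ++ r ++ "`"))]) := by
  by_cases hd : deps = [] <;> by_cases hr : revs = [] <;>
    simp [hd, hr]

-- ===== VERDICT (by name: the statement is the Claim_ definition above) =====
theorem file_dependency_details_spec : Claim_equal_file_dependency_details := by
  intro edges ranked _ hpre
  unfold Spec_file_dependency_details file_dependency_details file_dependency_details_alt
  simp only [List.foldl_map]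
  congr 1
  apply PySem.List.foldl_congr_mem
  intro acc t _
  have hrev := pv_rev_getD edges hpre t.1 PySem.Dict.empty
  simp only [PySem.Dict.getD_empty, List.nil_append] at hrev
  show _ = (let lines := pvLinesFor edges t.1
            if lines = [] then acc else PySem.Dict.insert acc t.1 lines)
  unfold pvLinesFor
  simp only [hrev, pv_lines_eq]
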